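-- pv_equiv track=rewrite | github.com/NonoM33/revers | exercises-src/fix_encodings.py | encode_flag
-- ===== SOURCE A (Python) =====
-- def encode_flag(flag, key=0x57):
--     encoded = [c ^ key for c in flag.encode()]
--     # Format as C array with 8 bytes per line
--     lines = []
--     for i in range(0, len(encoded), 8):
--         chunk = encoded[i:i+8]
--         line = ', '.join(f'0x{b:02x}' for b in chunk)
--         lines.append(line)
--     hex_str = ',\n    '.join(lines)
--     return len(flag), hex_str
-- ===== SOURCE B (Python) =====
-- def encode_flag(flag, key=0x57):
--     # Single flat pass: separator chosen per index, no chunk slicing, no intermediate line list.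
--     out = []
--     for i, c in enumerate(flag.encode()):
--         if i == 0:
--             sep = ''
--         elif i % 8 == 0:
--             sep = ',\n    '
--         else:
--             sep = ', '
--         out.append(sep + f'0x{c ^ key:02x}')
--     return len(flag), ''.join(out)
-- ===== Notes on version B (the rewrite author's own statement) =====
-- stated objective: simpler
-- what changed: Replaced A's chunk-by-8 slicing with a per-line list and two joins by a single flat pass over the encoded bytes that picks the separator ('', ', ' or ',\n ') from the index, so the intermediate line list and the slicing disappear.
import Mathlib
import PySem

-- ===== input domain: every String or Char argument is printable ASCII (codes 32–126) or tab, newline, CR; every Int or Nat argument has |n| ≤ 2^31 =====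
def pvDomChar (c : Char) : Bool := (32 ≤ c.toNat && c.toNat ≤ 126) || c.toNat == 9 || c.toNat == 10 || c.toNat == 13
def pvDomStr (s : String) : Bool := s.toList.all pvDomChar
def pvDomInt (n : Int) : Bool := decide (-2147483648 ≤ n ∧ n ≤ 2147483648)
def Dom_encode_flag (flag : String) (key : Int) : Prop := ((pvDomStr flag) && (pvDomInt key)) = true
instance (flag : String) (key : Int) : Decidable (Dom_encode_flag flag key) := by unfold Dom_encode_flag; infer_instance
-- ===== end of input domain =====

-- B replaces A's chunk-slice-then-double-join formatting by one flat pass over the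
-- encoded bytes, choosing the separator from the index (simpler decomposition, same cost).

-- ===== PORT A =====
-- f'0x{b:02x}': lowercase hex digits of |b|, '-' in front for negatives, zero-padded
-- (sign-aware, like str.zfill) to width 2, after the literal '0x' — exact for every Int b.
def pvHexDigit (n : Nat) : Char := if n < 10 then Char.ofNat (48 + n) else Char.ofNat (87 + n)

def pvHexAux (n : Nat) (acc : List Char) : List Char :=
  if h : n = 0 then acc else pvHexAux (n / 16) (pvHexDigit (n % 16) :: acc)
  termination_by n
  decreasing_by exact Nat.div_lt_self (Nat.pos_of_ne_zero h) (by norm_num)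

def pvHexTok (b : Int) : String :=
  "0x" ++ PySem.Str.zfill (String.ofList
    ((if b < 0 then ['-'] else []) ++ (if b.natAbs = 0 then ['0'] else pvHexAux b.natAbs []))) 2

def encode_flag (flag : String) (key : Int) : Int × String :=
  let encoded : List Int := flag.toList.map (fun c => PySem.Int.bxor ((c.toNat : Int)) key)
  let lines : List String := (PySem.List.pyRange 0 (encoded.length : Int) 8).foldl
    (fun ls i => ls ++ [PySem.Str.join ", " ((PySem.List.slice encoded (some i) (some (i + 8))).map pvHexTok)]) []
  (PySem.Str.len flag, PySem.Str.join ",\n    " lines)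

-- ===== PORT B =====
def encode_flag_alt (flag : String) (key : Int) : Int × String :=
  let out : List String := (PySem.List.enumerate (flag.toList.map (fun c => (c.toNat : Int))) 0).foldl
    (fun acc p =>
      let sep : String := if p.1 == 0 then "" else if PySem.Int.mod p.1 8 == 0 then ",\n    " else ", "
      acc ++ [sep ++ pvHexTok (PySem.Int.bxor p.2 key)]) []
  (PySem.Str.len flag, PySem.Str.join "" out)

-- ===== PRECONDITION & SPEC =====
def Spec_encode_flag (flag : String) (key : Int) (out : Int × String) : Prop := out = encode_flag_alt flag key
instance (flag : String) (key : Int) (out : Int × String) : Decidable (Spec_encode_flag flag key out) := by unfold Spec_encode_flag; infer_instance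

-- ===== CLAIM (what is proved, stated in full; the proofs are below) =====
def Claim_equal_encode_flag : Prop := ∀ (flag : String) (key : Int), Dom_encode_flag flag key → Spec_encode_flag flag key (encode_flag flag key)

-- ===== LEMMAS AND PROOFS =====

-- A's per-line list, as direct chunk recursion.
def pvLinesRec (ts : List String) : List String :=
  if h : ts = [] then [] else PySem.Str.join ", " (ts.take 8) :: pvLinesRec (ts.drop 8)
  termination_by ts.length
  decreasing_by have := List.length_pos_of_ne_nil h; simp only [List.length_drop]; omega

-- B's separator, as a function of the (nonnegative) index.
def pvSep (i : Int) : String :=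
  if i == 0 then "" else if PySem.Int.mod i 8 == 0 then ",\n    " else ", "

-- string basics ---------------------------------------------------------------
theorem pvStr_append_assoc (a b c : String) : (a ++ b) ++ c = a ++ (b ++ c) := by
  apply String.ext; simp

theorem pvStr_append_empty (a : String) : a ++ "" = a := by
  apply String.ext; simp

theorem pvStr_empty_append (a : String) : "" ++ a = a := by
  apply String.ext; simp

theorem pvSjoin_nil (sep : String) : PySem.Str.join sep [] = "" := by
  apply String.ext; simp [PySem.Str.join, PySem.Chars.join, List.intercalate]

theorem pvSjoin_singleton (sep x : String) : PySem.Str.join sep [x] = x := by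
  apply String.ext; simp [PySem.Str.join, PySem.Chars.join, List.intercalate]

theorem pvSjoin_cons_cons (sep p q : String) (r : List String) :
    PySem.Str.join sep (p :: q :: r) = p ++ sep ++ PySem.Str.join sep (q :: r) := by
  apply String.ext
  simp [PySem.Str.join, PySem.Chars.join, List.intercalate]

theorem pvSjoinE_cons (x : String) (r : List String) :
    PySem.Str.join "" (x :: r) = x ++ PySem.Str.join "" r := by
  cases r with
  | nil => rw [pvSjoin_nil, pvSjoin_singleton, pvStr_append_empty]
  | cons y r => rw [pvSjoin_cons_cons, pvStr_append_empty]

theorem pvSjoinE_append (l1 l2 : List String) :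
    PySem.Str.join "" (l1 ++ l2) = PySem.Str.join "" l1 ++ PySem.Str.join "" l2 := by
  induction l1 with
  | nil => rw [List.nil_append, pvSjoin_nil, pvStr_empty_append]
  | cons x l1 ih => rw [List.cons_append, pvSjoinE_cons, pvSjoinE_cons, ih, pvStr_append_assoc]

-- foldl that appends one element per step is a map ----------------------------
theorem pvFoldl_append_map {α β : Type} (f : α → β) (xs : List α) (acc : List β) :
    xs.foldl (fun ls x => ls ++ [f x]) acc = acc ++ xs.map f := by
  induction xs generalizing acc with
  | nil => simp
  | cons x xs ih => simp [List.foldl_cons, ih]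

-- enumerate over a mapped list -----------------------------------------------
theorem pvEnumerate_map {α β : Type} (f : α → β) (xs : List α) (s : Int) :
    PySem.List.enumerate (xs.map f) s
      = (PySem.List.enumerate xs s).map (fun p => (p.1, f p.2)) := by
  induction xs generalizing s with
  | nil => simp [PySem.List.enumerate_nil]
  | cons x xs ih => simp [PySem.List.enumerate_cons, ih]

-- A's range-of-chunk-starts map equals the chunk recursion --------------------
theorem pvRangeMap (ts : List String) :
    (List.range ((ts.length + 7) / 8)).map
      (fun k => PySem.Str.join ", " ((ts.drop (8 * k)).take 8)) = pvLinesRec ts := by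
  by_cases h : ts = []
  · subst h; simp [pvLinesRec]
  · have hlen : 1 ≤ ts.length := List.length_pos_of_ne_nil h
    have harith : (ts.length + 7) / 8 = ((ts.length - 8) + 7) / 8 + 1 := by omega
    rw [harith, List.range_succ_eq_map, List.map_cons, List.map_map]
    have htail : ∀ k, ts.drop (8 * (Nat.succ k)) = (ts.drop 8).drop (8 * k) := by
      intro k; rw [List.drop_drop]; congr 1; omega
    have hrec := pvRangeMap (ts.drop 8)
    rw [pvLinesRec, dif_neg h, ← hrec]
    have hm8 : ((ts.drop 8).length + 7) / 8 = (ts.length - 8 + 7) / 8 := by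
      simp only [List.length_drop]
    rw [hm8]
    refine congrArg₂ _ (by simp) ?_
    apply List.map_congr_left
    intro k _
    simp only [Function.comp, htail k, Nat.succ_eq_add_one]
  termination_by ts.length
  decreasing_by have := List.length_pos_of_ne_nil h; simp only [List.length_drop]; omega

-- A's range/slice loop equals the chunk recursion ------------------------------
theorem pvLinesA_eq (bs : List Int) :
    (PySem.List.pyRange 0 (bs.length : Int) 8).foldl
      (fun ls i => ls ++ [PySem.Str.join ", " ((PySem.List.slice bs (some i) (some (i + 8))).map pvHexTok)]) []
      = pvLinesRec (bs.map pvHexTok) := by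
  rw [PySem.List.pyRange_of_pos 0 (bs.length : Int) (by norm_num)]
  rw [List.foldl_map, pvFoldl_append_map, List.nil_append]
  rw [← pvRangeMap (bs.map pvHexTok)]
  have hN : (if (0:Int) < (bs.length : Int) then (((bs.length : Int) - 0 + 8 - 1) / 8).toNat else 0)
      = ((bs.map pvHexTok).length + 7) / 8 := by
    simp only [List.length_map]
    by_cases h : (0:Int) < (bs.length : Int)
    · rw [if_pos h]; omega
    · rw [if_neg h]; omega
  rw [hN]
  apply List.map_congr_left
  intro k _
  have hcast : (0 : Int) + 8 * (k : Int) = ((8 * k : Nat) : Int) := by push_cast; ring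
  have hcast2 : (0 : Int) + 8 * (k : Int) + 8 = ((8 * k : Nat) : Int) + ((8:Nat) : Int) := by
    push_cast; ring
  rw [hcast2, hcast, PySem.List.slice_natCast_add bs (8 * k) 8]
  rw [List.map_take, List.map_drop]

-- tail of a chunk: all indices are nonzero mod 8 -------------------------------
theorem pvB_inner (ys : List String) (s : Int) (hs : 0 < s % 8) (hlen : s % 8 + ys.length ≤ 8) :
    PySem.Str.join "" ((PySem.List.enumerate ys s).map (fun p => pvSep p.1 ++ p.2))
      = PySem.Str.join "" (ys.map (fun y => ", " ++ y)) := by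
  induction ys generalizing s with
  | nil => simp [PySem.List.enumerate_nil]
  | cons y ys ih =>
    rw [PySem.List.enumerate_cons, List.map_cons, List.map_cons, pvSjoinE_cons, pvSjoinE_cons]
    have hsep : pvSep s = ", " := by
      have h0 : ¬ s = 0 := by omega
      have h8 : ¬ PySem.Int.mod s 8 = 0 := by
        simp only [PySem.Int.mod, Int.fmod_eq_emod]; omega
      simp [pvSep, h0]
      omega
    rw [hsep]
    congr 1
    cases ys with
    | nil => simp [PySem.List.enumerate_nil]
    | cons z ys' =>
      apply ih
      · simp at hlen ⊢; omega
      · simp at hlen ⊢; omega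

theorem pvPrefixed_join (y : String) (ys : List String) :
    y ++ PySem.Str.join "" (ys.map (fun v => ", " ++ v)) = PySem.Str.join ", " (y :: ys) := by
  induction ys generalizing y with
  | nil => rw [List.map_nil, pvSjoin_nil, pvStr_append_empty, pvSjoin_singleton]
  | cons z ys ih =>
    rw [List.map_cons, pvSjoinE_cons, pvSjoin_cons_cons, ← ih z]
    simp [pvStr_append_assoc]

-- one chunk of B's flat pass --------------------------------------------------
theorem pvB_chunk (ys : List String) (s : Int) (hs : 0 ≤ s) (hm : s % 8 = 0)
    (hlen : ys.length ≤ 8) (hne : ys ≠ []) :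
    PySem.Str.join "" ((PySem.List.enumerate ys s).map (fun p => pvSep p.1 ++ p.2))
      = (if s = 0 then "" else ",\n    ") ++ PySem.Str.join ", " ys := by
  cases ys with
  | nil => exact absurd rfl hne
  | cons y ys =>
    rw [PySem.List.enumerate_cons, List.map_cons, pvSjoinE_cons]
    have hsep : pvSep s = if s = 0 then "" else ",\n    " := by
      have h8 : PySem.Int.mod s 8 = 0 := by
        simp only [PySem.Int.mod, Int.fmod_eq_emod]; omega
      by_cases h0 : s = 0
      · simp [pvSep, h0]
      · simp [pvSep, h0]
        omega
    have hinner : PySem.Str.join "" ((PySem.List.enumerate ys (s + 1)).map (fun p => pvSep p.1 ++ p.2))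
        = PySem.Str.join "" (ys.map (fun v => ", " ++ v)) := by
      cases ys with
      | nil => simp [PySem.List.enumerate_nil]
      | cons z ys' =>
        apply pvB_inner
        · omega
        · simp at hlen ⊢; omega
    rw [hinner, hsep, pvStr_append_assoc, pvPrefixed_join]

-- B's flat pass equals A's chunked join ----------------------------------------
theorem pvMain (ts : List String) (s : Int) (hs : 0 ≤ s) (hm : s % 8 = 0) :
    PySem.Str.join "" ((PySem.List.enumerate ts s).map (fun p => pvSep p.1 ++ p.2))
      = (if ts = [] then "" else (if s = 0 then "" else ",\n    ")) ++
        PySem.Str.join ",\n    " (pvLinesRec ts) := by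
  by_cases h : ts = []
  · subst h
    simp [PySem.List.enumerate_nil, pvLinesRec, pvSjoin_nil]
  · rw [if_neg h]
    have hsplit : ts = ts.take 8 ++ ts.drop 8 := (List.take_append_drop 8 ts).symm
    rw [pvLinesRec, dif_neg h]
    by_cases hd : ts.drop 8 = []
    · -- single chunk: ts has at most 8 elements
      have htake : ts.take 8 = ts := by
        apply List.take_of_length_le
        have := List.length_drop (l := ts) (i := 8)
        rw [hd] at this; simp at this; omega
      have hle : ts.length ≤ 8 := by
        have := List.length_drop (l := ts) (i := 8)
        rw [hd] at this; simp at this; omega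
      rw [hd, pvLinesRec, dif_pos rfl, pvSjoin_singleton, htake]
      exact pvB_chunk ts s hs hm hle h
    · -- more than one chunk
      have hlen8 : (ts.take 8).length = 8 := by
        rw [List.length_take]
        have := List.length_drop (l := ts) (i := 8)
        have hpos := List.length_pos_of_ne_nil hd
        rw [List.length_drop] at hpos
        omega
      conv_lhs => rw [hsplit]
      rw [PySem.List.enumerate_append, List.map_append, pvSjoinE_append]
      have hchunk := pvB_chunk (ts.take 8) s hs hm (by simp) (by
        intro hcon; rw [hcon] at hlen8; simp at hlen8)
      rw [hchunk]
      have hrec := pvMain (ts.drop 8) (s + (ts.take 8).length) (by omega)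
        (by rw [hlen8]; omega)
      rw [hrec, if_neg hd, if_neg (by rw [hlen8]; omega : ¬ s + ((ts.take 8).length : Int) = 0)]
      have hlrec : pvLinesRec (ts.drop 8) ≠ [] := by
        rw [pvLinesRec, dif_neg hd]; simp
      obtain ⟨l, ls, hls⟩ := List.exists_cons_of_ne_nil hlrec
      rw [hls, pvSjoin_cons_cons]
      simp [pvStr_append_assoc]
  termination_by ts.length
  decreasing_by have := List.length_pos_of_ne_nil h; simp only [List.length_drop]; omega

-- ===== VERDICT (by name: the statement is the Claim_ definition above) =====
theorem encode_flag_spec : Claim_equal_encode_flag := by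
  intro flag key _
  unfold Spec_encode_flag encode_flag encode_flag_alt
  refine Prod.ext rfl ?_
  simp only
  rw [pvLinesA_eq (flag.toList.map (fun c => PySem.Int.bxor ((c.toNat : Int)) key))]
  rw [pvFoldl_append_map, List.nil_append]
  rw [pvEnumerate_map (fun c : Char => ((c.toNat : Int))) flag.toList 0]
  rw [List.map_map, List.map_map]
  have hmain := pvMain ((flag.toList).map
    (fun c : Char => pvHexTok (PySem.Int.bxor ((c.toNat : Int)) key))) 0 le_rfl (by norm_num)
  rw [pvEnumerate_map, List.map_map] at hmain
  have hfun : ((fun p : Int × String => pvSep p.1 ++ p.2) ∘ fun p : Int × Char =>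
        (p.1, pvHexTok (PySem.Int.bxor ((p.2.toNat : Int)) key)))
      = ((fun p : Int × Int =>
          (if p.1 == 0 then "" else if PySem.Int.mod p.1 8 == 0 then ",\n    " else ", ")
            ++ pvHexTok (PySem.Int.bxor p.2 key)) ∘ fun p : Int × Char => (p.1, ((p.2.toNat : Int)))) := by
    funext p; simp [pvSep, Function.comp]
  rw [hfun] at hmain
  rw [hmain]
  have hpre : (if (flag.toList).map
      (fun c : Char => pvHexTok (PySem.Int.bxor ((c.toNat : Int)) key)) = [] then ""
      else if (0:Int) = 0 then "" else ",\n    ") = "" := by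
    split <;> simp
  rw [hpre, pvStr_empty_append]

  rfl
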